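-- pv_equiv track=rewrite | github.com/Zharkyn20/codewars | May_7/kill_the_monsters.py | kill_monsters
-- ===== SOURCE A (Python) =====
-- def kill_monsters(health, monsters, damage):
--     counter = 0
--     hits = 0
--     if monsters % 3 == 0:
--         hits -= 1
--     for i in range(monsters):
--         counter += 1
--         if counter % 3 == 0:
--             counter = 0
--             hits += 1
--     health -= damage * hits
--     if health <= 0:
--         return 'hero died'
--
--     return 'hits: {}, damage: {}, health: {}'\
--         .format(hits, damage*hits, health)
-- ===== SOURCE B (Python) =====
-- def kill_monsters(health, monsters, damage):
--     hits = max(monsters, 0) // 3 - (1 if monsters % 3 == 0 else 0)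
--     hp = health - damage * hits
--     if hp <= 0:
--         return 'hero died'
--     return f'hits: {hits}, damage: {damage * hits}, health: {hp}'
-- ===== Notes on version B (the rewrite author's own statement) =====
-- stated objective: faster
-- what changed: Replaces the O(monsters) counter loop with a closed-form hits = max(monsters,0)//3 - (1 if monsters%3==0 else 0) and an f-string.
import Mathlib
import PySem

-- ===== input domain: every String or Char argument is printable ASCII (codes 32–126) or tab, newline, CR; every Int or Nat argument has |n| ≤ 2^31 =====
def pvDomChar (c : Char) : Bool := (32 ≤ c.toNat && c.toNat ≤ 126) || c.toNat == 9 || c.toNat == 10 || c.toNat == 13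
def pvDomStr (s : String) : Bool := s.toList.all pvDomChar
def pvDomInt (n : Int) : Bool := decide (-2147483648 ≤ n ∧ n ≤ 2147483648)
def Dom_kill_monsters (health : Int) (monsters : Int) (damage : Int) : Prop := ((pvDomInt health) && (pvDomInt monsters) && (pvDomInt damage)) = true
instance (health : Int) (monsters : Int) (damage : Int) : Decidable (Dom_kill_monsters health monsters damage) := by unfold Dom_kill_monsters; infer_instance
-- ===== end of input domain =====

-- B replaces A's O(monsters) counting loop with the closed form max(monsters,0)//3 - [monsters%3==0] (faster, asymptotic).


-- ===== PORT A =====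
-- the 'for i in range(monsters)' loop: n remaining iterations, state (counter, hits)
def killLoop : Nat → Int → Int → Int × Int
  | 0, counter, hits => (counter, hits)
  | n + 1, counter, hits =>
      let counter := counter + 1
      if PySem.Int.mod counter 3 = 0 then killLoop n 0 (hits + 1)
      else killLoop n counter hits

def kill_monsters (health : Int) (monsters : Int) (damage : Int) : String :=
  let hits : Int := if PySem.Int.mod monsters 3 = 0 then 0 - 1 else 0
  let hits := (killLoop monsters.toNat 0 hits).2
  let health := health - damage * hits
  if health ≤ 0 then "hero died"
  else "hits: " ++ PySem.Int.toStr hits ++ ", damage: " ++ PySem.Int.toStr (damage * hits)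
       ++ ", health: " ++ PySem.Int.toStr health

-- ===== PORT B =====
def kill_monsters_alt (health : Int) (monsters : Int) (damage : Int) : String :=
  let hits : Int := PySem.Int.floordiv (max monsters 0) 3 - (if PySem.Int.mod monsters 3 = 0 then 1 else 0)
  let hp := health - damage * hits
  if hp ≤ 0 then "hero died"
  else "hits: " ++ PySem.Int.toStr hits ++ ", damage: " ++ PySem.Int.toStr (damage * hits)
       ++ ", health: " ++ PySem.Int.toStr hp

-- ===== PRECONDITION & SPEC =====
def Spec_kill_monsters (health : Int) (monsters : Int) (damage : Int) (out : String) : Prop := out = kill_monsters_alt health monsters damage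
instance (health : Int) (monsters : Int) (damage : Int) (out : String) : Decidable (Spec_kill_monsters health monsters damage out) := by unfold Spec_kill_monsters; infer_instance

-- ===== CLAIM (what is proved, stated in full; the proofs are below) =====
def Claim_equal_kill_monsters : Prop := ∀ (health : Int) (monsters : Int) (damage : Int), Dom_kill_monsters health monsters damage → Spec_kill_monsters health monsters damage (kill_monsters health monsters damage)

-- ===== LEMMAS AND PROOFS =====

lemma killLoop_step3 (n : Nat) (h : Int) : killLoop (n + 3) 0 h = killLoop n 0 (h + 1) := by
  simp [killLoop, PySem.Int.mod]

lemma killLoop_hits : ∀ (n : Nat) (h : Int), (killLoop n 0 h).2 = h + ((n / 3 : Nat) : Int) := by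
  intro n
  induction n using Nat.strong_induction_on with
  | _ n ih =>
    match n with
    | 0 => intro h; simp [killLoop]
    | 1 => intro h; simp [killLoop]
    | 2 => intro h; simp [killLoop]
    | (m + 3) =>
      intro h
      rw [killLoop_step3, ih m (by omega)]
      have : (m + 3) / 3 = m / 3 + 1 := by omega
      rw [this]
      push_cast
      ring

lemma floordiv_max (m : Int) : PySem.Int.floordiv (max m 0) 3 = ((m.toNat / 3 : Nat) : Int) := by
  have : max m 0 = (m.toNat : Int) := by omega
  rw [this]
  exact_mod_cast PySem.Int.floordiv_natCast m.toNat 3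

-- ===== VERDICT (by name: the statement is the Claim_ definition above) =====
theorem kill_monsters_spec : Claim_equal_kill_monsters := by
  intro health monsters damage _
  unfold Spec_kill_monsters
  simp only [kill_monsters, kill_monsters_alt, killLoop_hits, floordiv_max]
  by_cases h : PySem.Int.mod monsters 3 = 0 <;> simp only [h, if_false, if_pos] <;> ring_nf
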